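-- pv_equiv track=rewrite | github.com/CodelineAtyab/OrbitXO | examples/from_aya/Ai_final/app_service.py | get_z_value_iter
-- ===== SOURCE A (Python) =====
-- def get_char_value(char: str) -> int:
--     """Return alphabetic value a=1..z=26, underscore or others -> 0."""
--     if not char or not char.isalpha():
--         return 0
--     return ord(char.lower()) - ord("a") + 1
--
-- def get_z_value_iter(s: str, index: int):
--     """Iteratively compute the value contributed by one or more chained 'z' characters.
--     Each 'z' contributes 26 plus the value of the next non-z character (if present).
--     Returns (value, next_index).
--     """
--     total = 0
--     i = index
--     while i < len(s) and s[i].lower() == "z":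
--         total += 26
--         i += 1
--         # If there's a following char that's not another 'z', add its value and consume it
--         if i < len(s) and s[i].lower() != "z":
--             total += get_char_value(s[i])
--             i += 1
--             break
--     return total, i
-- ===== SOURCE B (Python) =====
-- def get_char_value(char: str) -> int:
--     """Return alphabetic value a=1..z=26, underscore or others -> 0."""
--     if not char or not char.isalpha():
--         return 0
--     return ord(char.lower()) - ord("a") + 1
--
-- def get_z_value_iter(s: str, index: int):
--     """Closed-form version: measure the z-run with lstrip, then one optional
--     trailing-character consume."""
--     rest = s[index:].lower()
--     k = len(rest) - len(rest.lstrip('z'))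
--     total = 26 * k
--     nxt = index + k
--     if k and nxt < len(s):
--         total += get_char_value(s[nxt])
--         nxt += 1
--     return total, nxt
-- ===== Notes on version B (the rewrite author's own statement) =====
-- stated objective: simpler
-- what changed: Replaces A's while-loop with an increment-and-break inside by a closed form: the z-run length k is measured once with lstrip('z') on the lowered suffix, total = 26*k, plus one optional trailing-character consume.
-- outside the precondition, e.g. on get_z_value_iter('zz', -1): A returns (78, 2), B returns (52, 1); on get_z_value_iter('ab', -5): A raises IndexError, B returns (0, -5)
import Mathlib
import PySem

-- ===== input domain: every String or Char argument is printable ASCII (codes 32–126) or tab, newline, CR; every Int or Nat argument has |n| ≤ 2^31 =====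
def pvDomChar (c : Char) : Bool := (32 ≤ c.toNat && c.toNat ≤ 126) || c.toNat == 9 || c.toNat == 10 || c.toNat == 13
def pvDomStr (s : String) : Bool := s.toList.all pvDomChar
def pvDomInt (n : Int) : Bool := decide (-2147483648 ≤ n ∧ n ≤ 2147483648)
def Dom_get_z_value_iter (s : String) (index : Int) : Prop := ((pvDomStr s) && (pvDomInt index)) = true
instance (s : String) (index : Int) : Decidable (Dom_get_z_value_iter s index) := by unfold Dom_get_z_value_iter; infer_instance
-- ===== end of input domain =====

-- B replaces A's while-loop by a closed form (z-run length via lstrip, total = 26*k); objective: simpler.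

-- ===== PORT A =====
-- get_char_value on a one-character string (A only ever calls it with s[i], a single char)
def pvGetCharValue (c : Char) : Int :=
  if ¬ PySem.Chars.isalpha c then 0
  else (PySem.Chars.lowerChar c).toNat - 97 + 1

-- the while-loop of A; fuel bounds the number of iterations (≤ len(s) for index ≥ 0)
def pvALoop (l : List Char) (fuel : Nat) (total i : Int) : Int × Int :=
  match fuel with
  | 0 => (total, i)
  | f + 1 =>
    if i < (l.length : Int) ∧ PySem.Chars.lowerChar (PySem.List.pyGetD l i ' ') = 'z' then
      let total := total + 26
      let i := i + 1
      if i < (l.length : Int) ∧ PySem.Chars.lowerChar (PySem.List.pyGetD l i ' ') ≠ 'z' then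
        (total + pvGetCharValue (PySem.List.pyGetD l i ' '), i + 1)
      else
        pvALoop l f total i
    else (total, i)

def get_z_value_iter (s : String) (index : Int) : Int × Int :=
  pvALoop s.toList (s.toList.length + 1) 0 index

-- ===== PORT B =====
def get_z_value_iter_alt (s : String) (index : Int) : Int × Int :=
  -- rest = s[index:].lower()
  let rest := PySem.Chars.lower (PySem.List.slice s.toList (some index) none)
  -- k = len(rest) - len(rest.lstrip('z'))   (lstrip('z') = dropWhile (= 'z'), exact)
  let k : Int := (rest.length : Int) - ((rest.dropWhile (fun c => c = 'z')).length : Int)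
  let total := 26 * k
  let nxt := index + k
  if k ≠ 0 ∧ nxt < (s.toList.length : Int) then
    (total + pvGetCharValue (PySem.List.pyGetD s.toList nxt ' '), nxt + 1)
  else
    (total, nxt)

-- ===== PRECONDITION & SPEC =====
-- Pre_ excludes negative indices: for index < -len(s) on a nonempty s A raises IndexError, and for
-- -len(s) ≤ index < 0 A's value reflects accidental negative-index wraparound of s[i] while i counts up.
def Pre_get_z_value_iter (s : String) (index : Int) : Prop := 0 ≤ index
instance (s : String) (index : Int) : Decidable (Pre_get_z_value_iter s index) := by
  unfold Pre_get_z_value_iter; infer_instance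

def pvWitness_get_z_value_iter : String × Int := ("zza", 0)

def Spec_get_z_value_iter (s : String) (index : Int) (out : Int × Int) : Prop :=
  out = get_z_value_iter_alt s index
instance (s : String) (index : Int) (out : Int × Int) : Decidable (Spec_get_z_value_iter s index out) := by
  unfold Spec_get_z_value_iter; infer_instance

-- ===== CLAIM (what is proved, stated in full; the proofs are below) =====
def Claim_equal_get_z_value_iter : Prop :=
  ∀ (s : String) (index : Int), Dom_get_z_value_iter s index →
    Pre_get_z_value_iter s index →
    Spec_get_z_value_iter s index (get_z_value_iter s index)

-- ===== LEMMAS AND PROOFS =====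

theorem pvGetElem_of_drop_cons {l : List Char} {k : Nat} {c : Char} {rest : List Char}
    (hm : l.drop k = c :: rest) (hk : k < l.length) : l[k] = c := by
  have h7 : (List.drop k l)[0]? = l[k + 0]? := List.getElem?_drop
  simp [hm] at h7
  simpa [List.getElem?_eq_getElem hk] using h7.symm

-- structural reference form of A's loop over the suffix list
def pvRefLoop (total i : Int) : List Char → Int × Int
  | [] => (total, i)
  | [c] => if PySem.Chars.lowerChar c = 'z' then (total + 26, i + 1) else (total, i)
  | c :: d :: rest =>
    if PySem.Chars.lowerChar c = 'z' then
      if PySem.Chars.lowerChar d ≠ 'z' then (total + 26 + pvGetCharValue d, i + 2)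
      else pvRefLoop (total + 26) (i + 1) (d :: rest)
    else (total, i)

-- closed form of the reference loop
def pvBForm (total i : Int) (m : List Char) : Int × Int :=
  let k : Nat := (m.takeWhile (fun c => PySem.Chars.lowerChar c = 'z')).length
  if k = 0 then (total, i)
  else
    match m.drop k with
    | [] => (total + 26 * k, i + k)
    | d :: _ => (total + 26 * k + pvGetCharValue d, i + k + 1)

theorem pvALoop_eq_ref (l : List Char) (fuel : Nat) :
    ∀ (i total : Int), 0 ≤ i → l.length ≤ i.toNat + fuel →
    pvALoop l fuel total i = pvRefLoop total i (l.drop i.toNat) := by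
  induction fuel with
  | zero =>
    intro i total h0 hf
    have hd : l.drop i.toNat = [] := List.drop_eq_nil_of_le (by omega)
    simp [pvALoop, hd, pvRefLoop]
  | succ f ih =>
    intro i total h0 hf
    rcases hm : l.drop i.toNat with _ | ⟨c, rest⟩
    · have hlen : l.length ≤ i.toNat := by
        by_contra hcon
        exact absurd hm (by simp [List.drop_eq_nil_iff]; omega)
      have hnl : ¬ (i < (l.length : Int)) := by omega
      simp [pvALoop, pvRefLoop, hnl]
    · have hlt : i.toNat < l.length := by
        by_contra hcon
        rw [List.drop_eq_nil_of_le (by omega)] at hm; cases hm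
      have higet : PySem.List.pyGetD l i ' ' = c := by
        rw [PySem.List.pyGetD_eq_getElem l ' ' h0 (by omega)]
        exact pvGetElem_of_drop_cons hm hlt
      have hilt : i < (l.length : Int) := by omega
      have hrest : l.drop (i.toNat + 1) = rest := by
        have hdd : l.drop (i.toNat + 1) = (l.drop i.toNat).drop 1 := by
          rw [List.drop_drop]
        simp [hdd, hm]
      have ht1 : (i + 1).toNat = i.toNat + 1 := by omega
      by_cases hz : PySem.Chars.lowerChar c = 'z'
      · rcases rest with _ | ⟨d, rest'⟩
        · -- suffix ends right after the z
          have hlen1 : l.length = i.toNat + 1 := by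
            have hc := congrArg List.length hrest; simp at hc; omega
          have hnot : ¬ (i + 1 < (l.length : Int)) := by omega
          have hrec := ih (i + 1) (total + 26) (by omega) (by omega)
          rw [ht1, hrest] at hrec
          simp only [pvALoop, hilt, hz, higet, and_true, if_true, hnot, false_and, if_false]
          rw [hrec]
          simp [pvRefLoop, hz]
        · have hlt1 : i.toNat + 1 < l.length := by
            have hc := congrArg List.length hrest; simp at hc; omega
          have hrest' : l.drop (i + 1).toNat = d :: rest' := by rw [ht1]; exact hrest
          have hi1get : PySem.List.pyGetD l (i + 1) ' ' = d := by
            rw [PySem.List.pyGetD_eq_getElem l ' ' (by omega) (by omega)]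
            exact pvGetElem_of_drop_cons hrest' (by omega)
          have hcond : i + 1 < (l.length : Int) := by omega
          by_cases hdz : PySem.Chars.lowerChar d = 'z'
          · -- next char is another z: loop continues
            have hrec := ih (i + 1) (total + 26) (by omega) (by omega)
            rw [ht1, hrest] at hrec
            simp only [pvALoop, hilt, hz, higet, hi1get, hdz, and_true, if_true, ne_eq,
              not_true_eq_false, and_false, if_false]
            rw [hrec]
            simp [pvRefLoop, hz, hdz]
          · -- next char is not z: add its value, consume, break
            simp only [pvALoop, hilt, hz, higet, hi1get, and_true, if_true, ne_eq, hdz,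
              not_false_eq_true, hcond, if_true]
            simp [pvRefLoop, hz, hdz]
            ring_nf
      · rcases rest with _ | ⟨d, rest'⟩ <;> simp [pvALoop, pvRefLoop, higet, hz]

theorem pvRefLoop_eq_BForm : ∀ (m : List Char) (total i : Int),
    pvRefLoop total i m = pvBForm total i m := by
  intro m
  induction m with
  | nil => intro total i; simp [pvRefLoop, pvBForm]
  | cons c rest ih =>
    intro total i
    by_cases hz : PySem.Chars.lowerChar c = 'z'
    · rcases rest with _ | ⟨d, rest'⟩
      · simp [pvRefLoop, pvBForm, hz, List.takeWhile]
      · by_cases hdz : PySem.Chars.lowerChar d = 'z'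
        · -- loop continues into the next z
          have hrec := ih (total + 26) (i + 1)
          simp only [pvRefLoop, hz, if_true, ne_eq, hdz, not_true_eq_false, if_false]
          rw [hrec]
          simp only [pvBForm, List.takeWhile_cons, hz, hdz, decide_true, if_true,
            List.length_cons, List.drop_succ_cons, Nat.succ_ne_zero, if_false]
          rcases hmm : rest'.drop (rest'.takeWhile (fun c => PySem.Chars.lowerChar c = 'z')).length with _ | ⟨e, es⟩ <;>
            · simp only [Prod.mk.injEq]
              exact ⟨by push_cast; ring, by push_cast; ring⟩
        · simp [pvRefLoop, pvBForm, hz, hdz, Prod.ext_iff]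
          ring
    · rcases rest with _ | ⟨d, rest'⟩ <;>
        simp [pvRefLoop, pvBForm, hz]

-- B's closed form equals pvBForm on the dropped suffix
theorem pvAlt_eq_BForm (s : String) (index : Int) (h0 : 0 ≤ index) :
    get_z_value_iter_alt s index = pvBForm 0 index (s.toList.drop index.toNat) := by
  simp only [get_z_value_iter_alt]
  set l := s.toList with hl
  set m := l.drop index.toNat with hmdef
  rw [PySem.List.slice_from l h0, ← hmdef]
  have hlower : PySem.Chars.lower m = m.map PySem.Chars.lowerChar := by
    simp [PySem.Chars.lower]
  rw [hlower]
  have hdw : (m.map PySem.Chars.lowerChar).dropWhile (fun c => c = 'z')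
      = (m.dropWhile (fun c => PySem.Chars.lowerChar c = 'z')).map PySem.Chars.lowerChar := by
    rw [List.dropWhile_map]
    rfl
  rw [hdw]
  set k : Nat := (m.takeWhile (fun c => PySem.Chars.lowerChar c = 'z')).length with hkdef
  have hsplit : k + (m.dropWhile (fun c => PySem.Chars.lowerChar c = 'z')).length = m.length := by
    have h := congrArg List.length (List.takeWhile_append_dropWhile
      (p := fun c => decide (PySem.Chars.lowerChar c = 'z')) (l := m))
    rw [List.length_append] at h
    exact h
  have hkInt : ((m.map PySem.Chars.lowerChar).length : Int)
      - (((m.dropWhile (fun c => PySem.Chars.lowerChar c = 'z')).map PySem.Chars.lowerChar).length : Int)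
      = (k : Int) := by
    simp only [List.length_map]
    omega
  rw [hkInt]
  have hmlen : m.length = l.length - index.toNat := by simp [hmdef]
  by_cases hk0 : k = 0
  · simp [pvBForm, ← hkdef, hk0]
  · have hk0' : ¬ ((k : Int) = 0) := by exact_mod_cast hk0
    have hkle : k ≤ m.length := by omega
    by_cases hlt : index + (k : Int) < (l.length : Int)
    · rcases hmm : m.drop k with _ | ⟨d, rest⟩
      · exact absurd hmm (by simp [List.drop_eq_nil_iff]; omega)
      · have hget : PySem.List.pyGetD l (index + (k : Int)) ' ' = d := by
          rw [PySem.List.pyGetD_eq_getElem l ' ' (by omega) hlt]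
          have ht : (index + (k : Int)).toNat = index.toNat + k := by omega
          have hdd : l.drop (index.toNat + k) = m.drop k := by
            rw [hmdef, List.drop_drop, Nat.add_comm]
          have hdrop2 : l.drop (index + (k : Int)).toNat = d :: rest := by
            rw [ht, hdd, hmm]
          exact pvGetElem_of_drop_cons hdrop2 (by omega)
        simp only [hlt, and_true, pvBForm, ← hkdef, hmm, hk0, if_false, hget]
        rw [if_pos (show (k : Int) ≠ 0 from by exact_mod_cast hk0)]
        simp only [Prod.mk.injEq]
        exact ⟨by ring, by trivial⟩
    · have hdropnil : m.drop k = [] := by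
        simp [List.drop_eq_nil_iff]
        omega
      have hnc : ¬ ((k : Int) ≠ 0 ∧ index + (k:Int) < (l.length : Int)) := by
        intro h; exact hlt h.2
      simp only [pvBForm, ← hkdef, hdropnil, hk0, if_false, hnc, Prod.mk.injEq]
      exact ⟨by ring, trivial⟩

-- ===== VERDICT (by name: the statement is the Claim_ definition above) =====
theorem get_z_value_iter_spec : Claim_equal_get_z_value_iter := by
  intro s index _hdom hpre
  unfold Spec_get_z_value_iter
  have h0 : 0 ≤ index := hpre
  rw [get_z_value_iter, pvALoop_eq_ref s.toList (s.toList.length + 1) index 0 h0 (by omega)]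
  rw [pvRefLoop_eq_BForm, pvAlt_eq_BForm s index h0]
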